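-- pv_equiv track=rewrite | github.com/patt502090/Programming-Competitions | !codeforces/contests/Codeforces Round 1039 (Div. 2)/106035/A. Pyramidal paths.py | is_pyramidal
-- ===== SOURCE A (Python) =====
-- def is_pyramidal(a):
--     n = len(a)
--     inc = a[1] > a[0]
--     i = 1
--
--     while i < n and ((a[i] > a[i-1]) if inc else (a[i] < a[i-1])):
--         i += 1
--
--     if i == n:
--         return False
--
--     while i < n and ((a[i] < a[i-1]) if inc else (a[i] > a[i-1])):
--         i += 1
--
--     return i == n
-- ===== SOURCE B (Python) =====
-- def _strictly_up(xs):
--     return all(x < y for x, y in zip(xs, xs[1:]))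
--
--
-- def _strictly_down(xs):
--     return all(x > y for x, y in zip(xs, xs[1:]))
--
--
-- def is_pyramidal(a):
--     inc = a[1] > a[0]
--     n = len(a)
--     p = a.index(max(a)) if inc else a.index(min(a))
--     if p == 0 or p == n - 1:
--         return False
--     if inc:
--         return _strictly_up(a[:p + 1]) and _strictly_down(a[p:])
--     return _strictly_down(a[:p + 1]) and _strictly_up(a[p:])
-- ===== Notes on version B (the rewrite author's own statement) =====
-- stated objective: alternative
-- what changed: Instead of A's two-phase pointer walk (advance while rising, then while falling), B locates the pivot as the index of the extremum (max for a rising start, min for a falling start), rejects boundary pivots, and checks that the two slices around the pivot are strictly monotone in opposite directions.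
import Mathlib
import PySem

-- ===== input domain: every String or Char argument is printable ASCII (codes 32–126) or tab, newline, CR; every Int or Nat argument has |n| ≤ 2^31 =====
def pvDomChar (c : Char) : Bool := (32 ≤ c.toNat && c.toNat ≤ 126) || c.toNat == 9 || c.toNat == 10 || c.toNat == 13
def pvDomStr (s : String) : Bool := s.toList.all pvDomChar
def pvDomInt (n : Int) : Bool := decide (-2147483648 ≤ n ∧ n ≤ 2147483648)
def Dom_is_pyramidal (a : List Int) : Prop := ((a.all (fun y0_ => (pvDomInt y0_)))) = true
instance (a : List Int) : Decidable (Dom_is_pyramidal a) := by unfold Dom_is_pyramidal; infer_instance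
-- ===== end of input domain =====

-- B replaces A's two-phase pointer walk by pivot-at-extremum plus two strict-monotone slice checks (objective: alternative).

-- ===== PORT A =====
-- the loop condition '(a[i] > a[i-1]) if inc else (a[i] < a[i-1])'; indices 1 ≤ i < len a, so getD is exact there
def pvStep (a : List Int) (u : Bool) (i : Nat) : Bool :=
  if u then decide (a.getD i 0 > a.getD (i-1) 0) else decide (a.getD i 0 < a.getD (i-1) 0)

-- 'while i < n and cond(i): i += 1', run with fuel = n - i so that fuel 0 ↔ i = n
def pvRunA (a : List Int) (u : Bool) : Nat → Nat → Nat
  | 0, i => i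
  | fuel+1, i => if pvStep a u i then pvRunA a u fuel (i+1) else i

def is_pyramidal (a : List Int) : Bool :=
  let n := a.length
  let inc := decide (a.getD 1 0 > a.getD 0 0)   -- a[1] > a[0]; exact for 2 ≤ n (Pre_)
  let i := pvRunA a inc (n - 1) 1
  if i = n then false
  else decide (pvRunA a (!inc) (n - i) i = n)

-- ===== PORT B =====
-- all(x < y for x, y in zip(xs, xs[1:]))
def pvUp : List Int → Bool
  | x :: y :: rest => decide (x < y) && pvUp (y :: rest)
  | _ => true

-- all(x > y for x, y in zip(xs, xs[1:]))
def pvDown : List Int → Bool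
  | x :: y :: rest => decide (x > y) && pvDown (y :: rest)
  | _ => true

-- a[:p+1] / a[p:] with 0 ≤ p < len a are List.take / List.drop exactly; on Pre_ the list is
-- nonempty, so max?/min?/index? are all some and the '.getD 0' never fires.
def is_pyramidal_alt (a : List Int) : Bool :=
  let inc := decide (a.getD 1 0 > a.getD 0 0)   -- a[1] > a[0]; exact for 2 ≤ n (Pre_)
  let n := a.length
  let p := (((if inc then PySem.List.max? a (fun x => x) else PySem.List.min? a (fun x => x)).bind
              (fun v => PySem.List.index? a v)).getD 0)
  if p = 0 ∨ p = n - 1 then false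
  else if inc then pvUp (a.take (p+1)) && pvDown (a.drop p)
  else pvDown (a.take (p+1)) && pvUp (a.drop p)

-- ===== PRECONDITION & SPEC =====
-- A evaluates a[1] first, so it raises IndexError on every list of length < 2 (and so does B).
def Pre_is_pyramidal (a : List Int) : Prop := 2 ≤ a.length
instance (a : List Int) : Decidable (Pre_is_pyramidal a) := by unfold Pre_is_pyramidal; infer_instance
def pvWitness_is_pyramidal : List Int := [1, 3, 2]

def Spec_is_pyramidal (a : List Int) (out : Bool) : Prop := out = is_pyramidal_alt a
instance (a : List Int) (out : Bool) : Decidable (Spec_is_pyramidal a out) := by unfold Spec_is_pyramidal; infer_instance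

-- ===== CLAIM (what is proved, stated in full; the proofs are below) =====
def Claim_equal_is_pyramidal : Prop := ∀ (a : List Int), Dom_is_pyramidal a → Pre_is_pyramidal a → Spec_is_pyramidal a (is_pyramidal a)

-- ===== LEMMAS AND PROOFS =====

-- the common shape both programs decide: strictly monotone in direction inc up to r-1, strictly
-- monotone the opposite way from r-1 on (r the first index compared in the second phase)
def pvShape (a : List Int) (inc : Bool) (r : Nat) : Prop :=
  1 ≤ r ∧ r < a.length ∧ (∀ k, 1 ≤ k → k < r → pvStep a inc k = true) ∧
    (∀ k, r ≤ k → k < a.length → pvStep a (!inc) k = true)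

theorem pvStep_not {a : List Int} {u : Bool} {i : Nat} (h : pvStep a (!u) i = true) :
    pvStep a u i = false := by
  cases u <;> simp [pvStep] at h ⊢ <;> omega

theorem pvRunA_le (a : List Int) (u : Bool) : ∀ fuel i, i ≤ pvRunA a u fuel i ∧ pvRunA a u fuel i ≤ i + fuel := by
  intro fuel
  induction fuel with
  | zero => intro i; simp [pvRunA]
  | succ fuel ih =>
    intro i
    simp only [pvRunA]
    split
    · have := ih (i+1); omega
    · omega

theorem pvRunA_steps (a : List Int) (u : Bool) : ∀ fuel i k, i ≤ k → k < pvRunA a u fuel i → pvStep a u k = true := by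
  intro fuel
  induction fuel with
  | zero => intro i k h1 h2; simp [pvRunA] at h2; omega
  | succ fuel ih =>
    intro i k h1 h2
    simp only [pvRunA] at h2
    split at h2
    · rcases Nat.eq_or_lt_of_le h1 with rfl | h'
      · assumption
      · exact ih (i+1) k h' h2
    · omega

theorem pvRunA_eq (a : List Int) (u : Bool) : ∀ fuel i r, i ≤ r → r ≤ i + fuel →
    (∀ k, i ≤ k → k < r → pvStep a u k = true) →
    (r = i + fuel ∨ pvStep a u r = false) → pvRunA a u fuel i = r := by
  intro fuel
  induction fuel with
  | zero => intro i r h1 h2 _ _; simp [pvRunA]; omega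
  | succ fuel ih =>
    intro i r h1 h2 hsteps hstop
    simp only [pvRunA]
    rcases Nat.eq_or_lt_of_le h1 with rfl | h'
    · have hst : pvStep a u i = false := by
        rcases hstop with h | h
        · omega
        · exact h
      simp [hst]
    · have hst : pvStep a u i = true := hsteps i le_rfl h'
      simp only [hst, if_true]
      refine ih (i+1) r h' (by omega) (fun k hk => hsteps k (by omega)) ?_
      rcases hstop with h | h
      · left; omega
      · right; exact h

theorem pvA_char (a : List Int) (h : 2 ≤ a.length) :
    is_pyramidal a = true ↔ ∃ r, pvShape a (decide (a.getD 1 0 > a.getD 0 0)) r := by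
  set n := a.length with hn
  set inc := decide (a.getD 1 0 > a.getD 0 0) with hinc
  simp only [is_pyramidal, ← hn, ← hinc]
  set r := pvRunA a inc (n - 1) 1 with hr
  constructor
  · intro hA
    split at hA
    · simp at hA
    · rename_i hne
      simp only [decide_eq_true_eq] at hA
      have hle := pvRunA_le a inc (n-1) 1
      refine ⟨r, by omega, by omega, ?_, ?_⟩
      · intro k hk1 hk2; exact pvRunA_steps a inc (n-1) 1 k hk1 hk2
      · intro k hk1 hk2
        exact pvRunA_steps a (!inc) (n - r) r k hk1 (by rw [hA]; omega)
  · rintro ⟨r0, h1, h2, h3, h4⟩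
    have hstop : pvStep a inc r0 = false :=
      pvStep_not (h4 r0 le_rfl h2)
    have hr0 : r = r0 := by
      rw [hr]
      exact pvRunA_eq a inc (n-1) 1 r0 h1 (by omega) (fun k hk1 hk2 => h3 k hk1 hk2) (Or.inr hstop)
    have hr2 : pvRunA a (!inc) (n - r0) r0 = n :=
      pvRunA_eq a (!inc) (n - r0) r0 n (by omega) (by omega) (fun k hk1 hk2 => h4 k hk1 hk2) (Or.inl (by omega))
    rw [hr0]
    have hne : ¬ (r0 = n) := by omega
    simp [hne, hr2]

theorem pvUp_iff : ∀ xs : List Int, (pvUp xs = true ↔ ∀ j, j + 1 < xs.length → xs.getD j 0 < xs.getD (j+1) 0)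
  | [] => by simp [pvUp]
  | [x] => by simp [pvUp]
  | x :: y :: rest => by
    rw [pvUp]
    simp only [Bool.and_eq_true, decide_eq_true_eq, pvUp_iff (y :: rest)]
    constructor
    · rintro ⟨hxy, hrest⟩ j hj
      cases j with
      | zero => simpa using hxy
      | succ j => simpa using hrest j (by simpa using hj)
    · intro h
      refine ⟨by simpa using h 0 (by simp), fun j hj => ?_⟩
      simpa using h (j+1) (by simp at hj ⊢; omega)

theorem pvDown_iff : ∀ xs : List Int, (pvDown xs = true ↔ ∀ j, j + 1 < xs.length → xs.getD (j+1) 0 < xs.getD j 0)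
  | [] => by simp [pvDown]
  | [x] => by simp [pvDown]
  | x :: y :: rest => by
    rw [pvDown]
    simp only [Bool.and_eq_true, decide_eq_true_eq, pvDown_iff (y :: rest)]
    constructor
    · rintro ⟨hxy, hrest⟩ j hj
      cases j with
      | zero => simpa using hxy
      | succ j => simpa using hrest j (by simpa using hj)
    · intro h
      refine ⟨by simpa using h 0 (by simp), fun j hj => ?_⟩
      simpa using h (j+1) (by simp at hj ⊢; omega)

theorem pvGetD_take (a : List Int) (m j : Nat) (h : j < m) : (a.take m).getD j 0 = a.getD j 0 := by
  simp [List.getD_eq_getElem?_getD, h]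

theorem pvGetD_drop (a : List Int) (p j : Nat) : (a.drop p).getD j 0 = a.getD (p+j) 0 := by
  simp [List.getD_eq_getElem?_getD, List.getElem?_drop]

theorem pvChain_mono (g : Nat → Int) (lo hi : Nat) (h : ∀ k, lo ≤ k → k < hi → g k < g (k+1)) :
    ∀ i j, lo ≤ i → i < j → j ≤ hi → g i < g j := by
  intro i j hli hij hjh
  induction j with
  | zero => omega
  | succ j ih =>
    rcases Nat.lt_or_ge i j with h' | h'
    · exact lt_trans (ih h' (by omega)) (h j (by omega) (by omega))
    · have : i = j := by omega
      subst this
      exact h i (by omega) (by omega)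

theorem pvPivot_max (a : List Int) (p0 : Nat) (hp : p0 < a.length)
    (hmax : ∀ k, k < a.length → k ≠ p0 → a.getD k 0 < a.getD p0 0) :
    ((PySem.List.max? a (fun x => x)).bind (fun v => PySem.List.index? a v)) = some p0 := by
  obtain ⟨v, hv⟩ : ∃ v, PySem.List.max? a (fun x => x) = some v := by
    cases h : PySem.List.max? a (fun x => x) with
    | none => rw [PySem.List.max?_eq_none_iff] at h; subst h; simp at hp
    | some v => exact ⟨v, rfl⟩
  have hvmem : v ∈ a := PySem.List.max?_mem hv
  have hvmax : ∀ y ∈ a, y ≤ v := fun y hy => PySem.List.max?_isMax hv y hy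
  have hgp : a.getD p0 0 = a[p0] := List.getD_eq_getElem a 0 hp
  have hveq : v = a.getD p0 0 := by
    obtain ⟨k, hk, hkv⟩ := List.mem_iff_getElem.mp hvmem
    by_cases hkp : k = p0
    · subst hkp; rw [hgp, hkv]
    · have h1 : a.getD k 0 < a.getD p0 0 := hmax k hk hkp
      have h2 : a.getD p0 0 ≤ v := by
        rw [hgp]; exact hvmax _ (List.getElem_mem hp)
      rw [List.getD_eq_getElem a 0 hk, hkv] at h1
      omega
  obtain ⟨j, hj⟩ := Option.isSome_iff_exists.mp ((PySem.List.index?_isSome_iff a v).mpr hvmem)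
  obtain ⟨hjlt, hjv, _⟩ := PySem.List.getElem_of_index?_eq_some hj
  have hjp : j = p0 := by
    by_contra hne
    have := hmax j hjlt hne
    rw [List.getD_eq_getElem a 0 hjlt, hjv, hveq] at this
    omega
  rw [hv]; simpa [hjp] using hj

theorem pvPivot_min (a : List Int) (p0 : Nat) (hp : p0 < a.length)
    (hmin : ∀ k, k < a.length → k ≠ p0 → a.getD p0 0 < a.getD k 0) :
    ((PySem.List.min? a (fun x => x)).bind (fun v => PySem.List.index? a v)) = some p0 := by
  obtain ⟨v, hv⟩ : ∃ v, PySem.List.min? a (fun x => x) = some v := by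
    cases h : PySem.List.min? a (fun x => x) with
    | none => rw [PySem.List.min?_eq_none_iff] at h; subst h; simp at hp
    | some v => exact ⟨v, rfl⟩
  have hvmem : v ∈ a := PySem.List.min?_mem hv
  have hvmin : ∀ y ∈ a, v ≤ y := fun y hy => PySem.List.min?_isMin hv y hy
  have hgp : a.getD p0 0 = a[p0] := List.getD_eq_getElem a 0 hp
  have hveq : v = a.getD p0 0 := by
    obtain ⟨k, hk, hkv⟩ := List.mem_iff_getElem.mp hvmem
    by_cases hkp : k = p0
    · subst hkp; rw [hgp, hkv]
    · have h1 : a.getD p0 0 < a.getD k 0 := hmin k hk hkp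
      have h2 : v ≤ a.getD p0 0 := by
        rw [hgp]; exact hvmin _ (List.getElem_mem hp)
      rw [List.getD_eq_getElem a 0 hk, hkv] at h1
      omega
  obtain ⟨j, hj⟩ := Option.isSome_iff_exists.mp ((PySem.List.index?_isSome_iff a v).mpr hvmem)
  obtain ⟨hjlt, hjv, _⟩ := PySem.List.getElem_of_index?_eq_some hj
  have hjp : j = p0 := by
    by_contra hne
    have := hmin j hjlt hne
    rw [List.getD_eq_getElem a 0 hjlt, hjv, hveq] at this
    omega
  rw [hv]; simpa [hjp] using hj

theorem pvPivot_lt (a : List Int) (ha : a ≠ []) (inc : Bool) :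
    (((if inc then PySem.List.max? a (fun x => x) else PySem.List.min? a (fun x => x)).bind
        (fun v => PySem.List.index? a v)).getD 0) < a.length := by
  obtain ⟨v, hv, hmem⟩ : ∃ v, (if inc then PySem.List.max? a (fun x => x) else PySem.List.min? a (fun x => x)) = some v ∧ v ∈ a := by
    cases inc
    · simp only [Bool.false_eq_true, if_false]
      cases h : PySem.List.min? a (fun x => x) with
      | none => rw [PySem.List.min?_eq_none_iff] at h; exact absurd h ha
      | some v => exact ⟨v, rfl, PySem.List.min?_mem h⟩
    · simp only [if_true]
      cases h : PySem.List.max? a (fun x => x) with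
      | none => rw [PySem.List.max?_eq_none_iff] at h; exact absurd h ha
      | some v => exact ⟨v, rfl, PySem.List.max?_mem h⟩
  obtain ⟨j, hj⟩ := Option.isSome_iff_exists.mp ((PySem.List.index?_isSome_iff a v).mpr hmem)
  obtain ⟨hjlt, -, -⟩ := PySem.List.getElem_of_index?_eq_some hj
  rw [hv]
  show (PySem.List.index? a v).getD 0 < a.length
  rw [hj]
  simpa using hjlt

theorem pvB_char (a : List Int) (h : 2 ≤ a.length) :
    is_pyramidal_alt a = true ↔ ∃ r, pvShape a (decide (a.getD 1 0 > a.getD 0 0)) r := by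
  set n := a.length with hn
  set inc := decide (a.getD 1 0 > a.getD 0 0) with hinc
  have hne : a ≠ [] := by intro h'; rw [hn, h'] at h; simp at h
  simp only [is_pyramidal_alt, ← hn, ← hinc]
  set p := (((if inc then PySem.List.max? a (fun x => x) else PySem.List.min? a (fun x => x)).bind
              (fun v => PySem.List.index? a v)).getD 0) with hp
  have hplt : p < n := pvPivot_lt a hne inc
  constructor
  · intro hB
    split at hB
    · simp at hB
    · rename_i hcond
      obtain ⟨hp0, hpn⟩ := not_or.mp hcond
      have hp1 : 1 ≤ p := Nat.one_le_iff_ne_zero.mpr hp0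
      have hpn2 : p < n - 1 := by omega
      have hlt : (a.take (p+1)).length = p + 1 := by
        simp [← hn]; omega
      have hld : (a.drop p).length = n - p := by simp [← hn]
      refine ⟨p + 1, by omega, by omega, ?_, ?_⟩ <;> cases hI : inc <;> rw [hI] at hB <;>
        simp only [Bool.false_eq_true, if_false, if_true, Bool.and_eq_true] at hB
      · -- inc = false, first phase: strictly down on the prefix
        intro k hk1 hk2
        have := (pvDown_iff _).mp hB.1 (k-1) (by rw [hlt]; omega)
        rw [pvGetD_take a (p+1) (k-1) (by omega), pvGetD_take a (p+1) (k-1+1) (by omega)] at this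
        simp only [pvStep, if_false, Bool.false_eq_true, decide_eq_true_eq]
        have hkk : k - 1 + 1 = k := by omega
        rw [hkk] at this; exact this
      · -- inc = true
        intro k hk1 hk2
        have := (pvUp_iff _).mp hB.1 (k-1) (by rw [hlt]; omega)
        rw [pvGetD_take a (p+1) (k-1) (by omega), pvGetD_take a (p+1) (k-1+1) (by omega)] at this
        simp only [pvStep, if_true, decide_eq_true_eq, gt_iff_lt]
        have hkk : k - 1 + 1 = k := by omega
        rw [hkk] at this; exact this
      · -- inc = false, second phase: strictly up on the suffix
        intro k hk1 hk2
        have := (pvUp_iff _).mp hB.2 (k-p-1) (by rw [hld]; omega)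
        rw [pvGetD_drop, pvGetD_drop] at this
        simp only [pvStep, Bool.not_false, if_true, decide_eq_true_eq, gt_iff_lt]
        have h1 : p + (k-p-1) = k - 1 := by omega
        have h2 : p + (k-p-1+1) = k := by omega
        rw [h1, h2] at this; exact this
      · -- inc = true
        intro k hk1 hk2
        have := (pvDown_iff _).mp hB.2 (k-p-1) (by rw [hld]; omega)
        rw [pvGetD_drop, pvGetD_drop] at this
        simp only [pvStep, Bool.not_true, if_false, Bool.false_eq_true, decide_eq_true_eq]
        have h1 : p + (k-p-1) = k - 1 := by omega
        have h2 : p + (k-p-1+1) = k := by omega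
        rw [h1, h2] at this; exact this
  · rintro ⟨r, h1, h2, h3, h4⟩
    have hr2 : 2 ≤ r := by
      by_contra hr1
      have hstep := h4 1 (by omega) (by omega)
      cases hI : inc <;> rw [hI] at hstep <;>
        simp [pvStep] at hstep <;> rw [hinc] at hI <;> simp at hI <;> omega
    set p0 := r - 1 with hp0
    have hpn : p0 < n - 1 := by omega
    cases hI : inc
    · -- valley: min at p0
      have hdown1 : ∀ k, 0 ≤ k → k < p0 → a.getD (k+1) 0 < a.getD k 0 := by
        intro k _ hk
        have := h3 (k+1) (by omega) (by omega)
        rw [hI] at this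
        simpa [pvStep] using this
      have hup2 : ∀ k, p0 ≤ k → k < n - 1 → a.getD k 0 < a.getD (k+1) 0 := by
        intro k hk1 hk2
        have := h4 (k+1) (by omega) (by omega)
        rw [hI] at this
        simpa [pvStep] using this
      have hmin : ∀ k, k < n → k ≠ p0 → a.getD p0 0 < a.getD k 0 := by
        intro k hk hkp
        rcases Nat.lt_or_ge k p0 with h' | h'
        · have := pvChain_mono (fun j => - a.getD j 0) 0 p0
            (fun j _ hj => by simpa using hdown1 j (by omega) hj) k p0 (by omega) h' le_rfl
          simpa using this
        · have := pvChain_mono (fun j => a.getD j 0) p0 (n-1) hup2 p0 k le_rfl (by omega) (by omega)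
          exact this
      have hpiv := pvPivot_min a p0 (by omega) hmin
      rw [hI] at hp
      simp only [Bool.false_eq_true, if_false] at hp
      have hpe : p = p0 := by rw [hp, hpiv]; rfl
      have hcond : ¬ (p = 0 ∨ p = n - 1) := by omega
      rw [if_neg hcond]
      simp only [Bool.false_eq_true, if_false, Bool.and_eq_true]
      constructor
      · rw [pvDown_iff]
        intro j hj
        have hjl : j + 1 < p + 1 := by
          have : (a.take (p+1)).length = p + 1 := by simp [← hn]; omega
          omega
        rw [pvGetD_take a (p+1) j (by omega), pvGetD_take a (p+1) (j+1) (by omega)]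
        have := hdown1 j (by omega) (by omega)
        exact this
      · rw [pvUp_iff]
        intro j hj
        have hjl : j + 1 < n - p := by
          have : (a.drop p).length = n - p := by simp [← hn]
          omega
        rw [pvGetD_drop, pvGetD_drop]
        have := hup2 (p + j) (by omega) (by omega)
        simpa [Nat.add_assoc] using this
    · -- mountain: max at p0
      have hup1 : ∀ k, 0 ≤ k → k < p0 → a.getD k 0 < a.getD (k+1) 0 := by
        intro k _ hk
        have := h3 (k+1) (by omega) (by omega)
        rw [hI] at this
        simpa [pvStep] using this
      have hdown2 : ∀ k, p0 ≤ k → k < n - 1 → a.getD (k+1) 0 < a.getD k 0 := by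
        intro k hk1 hk2
        have := h4 (k+1) (by omega) (by omega)
        rw [hI] at this
        simpa [pvStep] using this
      have hmax : ∀ k, k < n → k ≠ p0 → a.getD k 0 < a.getD p0 0 := by
        intro k hk hkp
        rcases Nat.lt_or_ge k p0 with h' | h'
        · exact pvChain_mono (fun j => a.getD j 0) 0 p0 (fun j _ hj => hup1 j (by omega) hj) k p0 (by omega) h' le_rfl
        · have := pvChain_mono (fun j => - a.getD j 0) p0 (n-1)
            (fun j hj1 hj2 => by simpa using hdown2 j hj1 hj2) p0 k le_rfl (by omega) (by omega)
          simpa using this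
      have hpiv := pvPivot_max a p0 (by omega) hmax
      rw [hI] at hp
      simp only [if_true] at hp
      have hpe : p = p0 := by rw [hp, hpiv]; rfl
      have hcond : ¬ (p = 0 ∨ p = n - 1) := by omega
      rw [if_neg hcond]
      simp only [if_true, Bool.and_eq_true]
      constructor
      · rw [pvUp_iff]
        intro j hj
        have hjl : j + 1 < p + 1 := by
          have : (a.take (p+1)).length = p + 1 := by simp [← hn]; omega
          omega
        rw [pvGetD_take a (p+1) j (by omega), pvGetD_take a (p+1) (j+1) (by omega)]
        exact hup1 j (by omega) (by omega)
      · rw [pvDown_iff]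
        intro j hj
        have hjl : j + 1 < n - p := by
          have : (a.drop p).length = n - p := by simp [← hn]
          omega
        rw [pvGetD_drop, pvGetD_drop]
        have := hdown2 (p + j) (by omega) (by omega)
        simpa [Nat.add_assoc] using this

-- ===== VERDICT (by name: the statement is the Claim_ definition above) =====
theorem is_pyramidal_spec : Claim_equal_is_pyramidal := by
  intro a _ hpre
  unfold Spec_is_pyramidal
  exact Bool.eq_iff_iff.mpr ((pvA_char a hpre).trans (pvB_char a hpre).symm)
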